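-- pv_equiv track=rewrite | github.com/mkaratarakis/Autoformalization_Cleaned | pipeline.py | replace_proofs_with_sorry_in_text
-- ===== SOURCE A (Python) =====
-- def replace_proofs_with_sorry_in_text(text: str) -> str:
-- 	lines = text.splitlines(keepends=True)
-- 	new_lines = []
-- 	in_proof = False
-- 	for line in lines:
-- 		if not in_proof and ":=" in line:
-- 			prefix, _ = line.split(":=", 1)
-- 			new_lines.append(prefix.strip() + " := by sorry\n")
-- 			in_proof = True
-- 		elif in_proof:
-- 			if line.strip() == "":
-- 				new_lines.append(line)
-- 				in_proof = False
-- 			# Skip lines within the proof block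
-- 		else:
-- 			new_lines.append(line)
-- 	return "".join(new_lines)
-- ===== SOURCE B (Python) =====
-- def _truncate(block):
--     kept = []
--     for line in block:
--         if ":=" in line:
--             kept.append(line.split(":=", 1)[0].strip() + " := by sorry\n")
--             return kept
--         kept.append(line)
--     return kept
--
--
-- def replace_proofs_with_sorry_in_text(text: str) -> str:
--     lines = text.splitlines(keepends=True)
--     # stage 1: cut the document into paragraphs at blank lines (blank kept as separator)
--     blocks = []
--     cur = []
--     for line in lines:
--         if line.strip() == "":
--             blocks.append((cur, [line]))
--             cur = []
--         else:
--             cur.append(line)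
--     blocks.append((cur, []))
--     # stage 2: truncate each paragraph at its first ':=' line, then rejoin
--     out = []
--     for block, sep in blocks:
--         out.extend(_truncate(block))
--         out.extend(sep)
--     return "".join(out)
-- ===== Notes on version B (the rewrite author's own statement) =====
-- stated objective: alternative
-- what changed: Replaces A's single-pass in_proof state machine with a staged algorithm: first cut the line list into blank-line-separated paragraphs, then truncate each paragraph independently at its first ':=' line, then rejoin.
import Mathlib
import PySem

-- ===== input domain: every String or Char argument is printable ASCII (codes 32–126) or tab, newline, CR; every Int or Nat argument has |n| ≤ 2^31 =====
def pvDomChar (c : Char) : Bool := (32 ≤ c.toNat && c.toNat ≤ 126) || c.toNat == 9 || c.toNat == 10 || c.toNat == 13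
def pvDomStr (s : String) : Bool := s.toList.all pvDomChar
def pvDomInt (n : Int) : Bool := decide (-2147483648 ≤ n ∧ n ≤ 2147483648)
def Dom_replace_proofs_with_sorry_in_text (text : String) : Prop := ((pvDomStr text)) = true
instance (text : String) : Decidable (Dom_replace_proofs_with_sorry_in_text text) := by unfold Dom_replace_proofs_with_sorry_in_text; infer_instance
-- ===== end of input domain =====

-- B replaces A's single-pass in_proof state machine by a staged algorithm: cut the text
-- into blank-line-separated paragraphs, truncate each paragraph at its first ':=' line
-- independently, and rejoin (objective: alternative decomposition, same cost).

-- Shared helper: text.splitlines(keepends=True), hand-ported (PySem.Chars.splitlines drops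
-- the terminators). Exact on the stated domain: within Dom_ the only line-break characters
-- Python recognises are '\n', '\r' and the pair '\r\n'.
def pvSplitKeep (cur : List Char) : List Char → List (List Char)
  | [] => if cur = [] then [] else [cur.reverse]
  | '\r' :: '\n' :: rest => (cur.reverse ++ ['\r', '\n']) :: pvSplitKeep [] rest
  | '\r' :: rest => (cur.reverse ++ ['\r']) :: pvSplitKeep [] rest
  | '\n' :: rest => (cur.reverse ++ ['\n']) :: pvSplitKeep [] rest
  | c :: rest => pvSplitKeep (c :: cur) rest

-- Shared helper: line.split(":=", 1)[0].strip() + " := by sorry\n"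
def pvSorryLine (line : List Char) : List Char :=
  PySem.Chars.strip ((PySem.Chars.splitOnMax line ":=".toList 1).headD []) ++ " := by sorry\n".toList

-- ===== PORT A =====
-- the body of A's for-loop, state = (new_lines, in_proof)
def pvStepA (st : List (List Char) × Bool) (line : List Char) : List (List Char) × Bool :=
  if !st.2 && PySem.Chars.isIn ":=".toList line then
    (st.1 ++ [pvSorryLine line], true)
  else if st.2 then
    (if PySem.Chars.strip line = [] then (st.1 ++ [line], false) else st)
  else (st.1 ++ [line], false)

def pvLoopA (lines : List (List Char)) : List (List Char) × Bool :=
  lines.foldl pvStepA ([], false)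

def replace_proofs_with_sorry_in_text (text : String) : String :=
  String.mk (PySem.Chars.join [] (pvLoopA (pvSplitKeep [] text.toList)).1)

-- ===== PORT B =====
-- Source B _truncate: keep lines of a paragraph up to its first ':=' line (replaced by the sorry line)
def pvTrunc : List (List Char) → List (List Char)
  | [] => []
  | line :: rest =>
    if PySem.Chars.isIn ":=".toList line then [pvSorryLine line]
    else line :: pvTrunc rest

-- Source B stage 1: cut the line list into (paragraph, separator) pairs at blank lines
def pvBlocks (cur : List (List Char)) : List (List Char) → List (List (List Char) × List (List Char))
  | [] => [(cur, [])]
  | line :: rest =>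
    if PySem.Chars.strip line = [] then (cur, [line]) :: pvBlocks [] rest
    else pvBlocks (cur ++ [line]) rest

def replace_proofs_with_sorry_in_text_alt (text : String) : String :=
  -- Source B stage 2: out.extend(_truncate(block)); out.extend(sep) over all blocks, then join
  String.mk (PySem.Chars.join []
    ((pvBlocks [] (pvSplitKeep [] text.toList)).foldl
      (fun acc p => acc ++ pvTrunc p.1 ++ p.2) []))

-- ===== PRECONDITION & SPEC =====
def Spec_replace_proofs_with_sorry_in_text (text : String) (out : String) : Prop := out = replace_proofs_with_sorry_in_text_alt text
instance (text : String) (out : String) : Decidable (Spec_replace_proofs_with_sorry_in_text text out) := by unfold Spec_replace_proofs_with_sorry_in_text; infer_instance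

-- ===== CLAIM (what is proved, stated in full; the proofs are below) =====
def Claim_equal_replace_proofs_with_sorry_in_text : Prop := ∀ (text : String), Dom_replace_proofs_with_sorry_in_text text → Spec_replace_proofs_with_sorry_in_text text (replace_proofs_with_sorry_in_text text)

-- ===== LEMMAS AND PROOFS =====

-- proof-only middle form: A's fold rewritten as a block-consuming scan
mutual
def pvGoB : List (List Char) → List (List Char)
  | [] => []
  | line :: rest =>
    if PySem.Chars.isIn ":=".toList line then
      pvSorryLine line :: pvSkipB rest
    else line :: pvGoB rest
def pvSkipB : List (List Char) → List (List Char)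
  | [] => []
  | line :: rest =>
    if PySem.Chars.strip line = [] then line :: pvGoB rest
    else pvSkipB rest
end

-- A's flag-carrying fold equals the block-consuming scan, for both flag values.
theorem pvLoop_spec (lines : List (List Char)) :
    (∀ acc : List (List Char),
      (lines.foldl pvStepA (acc, false)).1 = acc ++ pvGoB lines) ∧
    (∀ acc : List (List Char),
      (lines.foldl pvStepA (acc, true)).1 = acc ++ pvSkipB lines) := by
  induction lines with
  | nil => simp [pvGoB, pvSkipB]
  | cons line rest ih =>
    constructor
    · intro acc
      rw [List.foldl_cons]
      by_cases h : PySem.Chars.isIn ([':', '='] : List Char) line = true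
      · rw [show pvStepA (acc, false) line = (acc ++ [pvSorryLine line], true) by
            simp [pvStepA, h]]
        rw [ih.2]
        simp [pvGoB, h]
      · rw [show pvStepA (acc, false) line = (acc ++ [line], false) by
            simp [pvStepA, h]]
        rw [ih.1]
        simp [pvGoB, h]
    · intro acc
      rw [List.foldl_cons]
      by_cases h : PySem.Chars.strip line = []
      · rw [show pvStepA (acc, true) line = (acc ++ [line], false) by
            simp [pvStepA, h]]
        rw [ih.1]
        simp [pvSkipB, h]
      · rw [show pvStepA (acc, true) line = (acc, true) by simp [pvStepA, h]]
        rw [ih.2]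
        simp [pvSkipB, h]

-- a blank line (strip == []) cannot contain ":=" : every char of it is whitespace
theorem pvBlank_no_colon (l : List Char)
    (h : PySem.Chars.strip l = []) : PySem.Chars.isIn ([':', '='] : List Char) l = false := by
  have hall : ∀ c ∈ l, PySem.Chars.isspace c = true := by
    intro c hc
    unfold PySem.Chars.strip PySem.Chars.rstrip PySem.Chars.lstrip at h
    have h1 : List.dropWhile PySem.Chars.isspace
        (List.dropWhile PySem.Chars.isspace l).reverse = [] :=
      List.reverse_eq_nil_iff.mp h
    have hdrop : ∀ x ∈ List.dropWhile PySem.Chars.isspace l, PySem.Chars.isspace x = true := by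
      intro x hx
      exact List.dropWhile_eq_nil_iff.mp h1 x (List.mem_reverse.mpr hx)
    have hsplit := List.takeWhile_append_dropWhile (p := PySem.Chars.isspace) (l := l)
    rw [← hsplit] at hc
    rcases List.mem_append.mp hc with h2 | h2
    · exact List.mem_takeWhile_imp h2
    · exact hdrop c h2
  by_contra hne
  have hin : PySem.Chars.isIn ([':', '='] : List Char) l = true := by
    cases hv : PySem.Chars.isIn ([':', '='] : List Char) l
    · exact absurd hv hne
    · rfl
  rcases (PySem.Chars.isIn_iff_infix _ _).mp hin with ⟨s, t, hst⟩
  have hcolon : (':' : Char) ∈ l := by rw [← hst]; simp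
  have := hall ':' hcolon
  simp [PySem.Chars.isspace] at this

-- pvTrunc over an append: a ':='-free prefix passes through
theorem pvTrunc_append_no (xs ys : List (List Char))
    (h : ∀ m ∈ xs, PySem.Chars.isIn ([':', '='] : List Char) m = false) :
    pvTrunc (xs ++ ys) = xs ++ pvTrunc ys := by
  induction xs with
  | nil => simp
  | cons x xs ih =>
    have hx := h x (by simp)
    simp [pvTrunc, hx, ih (fun m hm => h m (List.mem_cons_of_mem _ hm))]

-- pvTrunc over an append: a prefix containing a ':=' line absorbs the suffix
theorem pvTrunc_append_yes (xs ys : List (List Char))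
    (h : ∃ m ∈ xs, PySem.Chars.isIn ([':', '='] : List Char) m = true) :
    pvTrunc (xs ++ ys) = pvTrunc xs := by
  induction xs with
  | nil => rcases h with ⟨m, hm, _⟩; cases hm
  | cons x xs ih =>
    by_cases hx : PySem.Chars.isIn ([':', '='] : List Char) x = true
    · simp [pvTrunc, hx]
    · rcases h with ⟨m, hm, hmv⟩
      rcases List.mem_cons.mp hm with rfl | hm'
      · exact absurd hmv hx
      · simp [pvTrunc, hx, ih ⟨m, hm', hmv⟩]

-- the flat output of B's staged blocks equals the block-consuming scan
theorem pvBlocks_spec (lines : List (List Char)) :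
    (∀ cur : List (List Char),
      (∀ m ∈ cur, PySem.Chars.isIn ([':', '='] : List Char) m = false) →
      (pvBlocks cur lines).flatMap (fun p => pvTrunc p.1 ++ p.2) = cur ++ pvGoB lines) ∧
    (∀ cur : List (List Char),
      (∃ m ∈ cur, PySem.Chars.isIn ([':', '='] : List Char) m = true) →
      (pvBlocks cur lines).flatMap (fun p => pvTrunc p.1 ++ p.2) = pvTrunc cur ++ pvSkipB lines) := by
  induction lines with
  | nil =>
    constructor
    · intro cur hcur
      have hid : pvTrunc cur = cur := by
        have := pvTrunc_append_no cur [] hcur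
        simpa [pvTrunc] using this
      simp [pvBlocks, pvGoB, hid]
    · intro cur _
      simp [pvBlocks, pvSkipB]
  | cons line rest ih =>
    constructor
    · intro cur hcur
      by_cases hb : PySem.Chars.strip line = []
      · have hnc := pvBlank_no_colon line hb
        have hid : pvTrunc cur = cur := by
          have := pvTrunc_append_no cur [] hcur
          simpa [pvTrunc] using this
        simp only [pvBlocks, hb, ite_true, List.flatMap_cons]
        rw [ih.1 [] (by simp)]
        simp [pvGoB, hnc, hid]
      · by_cases hc : PySem.Chars.isIn ([':', '='] : List Char) line = true
        · simp only [pvBlocks, hb, ite_false, if_neg hb]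
          rw [ih.2 (cur ++ [line]) ⟨line, by simp, hc⟩]
          rw [pvTrunc_append_no cur [line] hcur]
          simp [pvGoB, pvTrunc, hc]
        · simp only [pvBlocks, hb, ite_false, if_neg hb]
          rw [ih.1 (cur ++ [line]) (by
            intro m hm
            rcases List.mem_append.mp hm with h1 | h2
            · exact hcur m h1
            · simp at h2; subst h2; simpa using hc)]
          simp [pvGoB, hc]
    · intro cur hcur
      by_cases hb : PySem.Chars.strip line = []
      · simp only [pvBlocks, hb, ite_true, List.flatMap_cons]
        rw [ih.1 [] (by simp)]
        simp [pvSkipB, hb]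
      · simp only [pvBlocks, hb, ite_false, if_neg hb]
        rw [ih.2 (cur ++ [line]) (by
          rcases hcur with ⟨m, hm, hmv⟩; exact ⟨m, by simp [hm], hmv⟩)]
        rw [pvTrunc_append_yes cur [line] hcur]
        simp [pvSkipB, hb]

-- the foldl in B's port is the flatMap over the blocks
theorem pvFoldl_flat (bs : List (List (List Char) × List (List Char)))
    (acc : List (List Char)) :
    bs.foldl (fun acc p => acc ++ pvTrunc p.1 ++ p.2) acc
      = acc ++ bs.flatMap (fun p => pvTrunc p.1 ++ p.2) := by
  induction bs generalizing acc with
  | nil => simp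
  | cons b bs ih => simp [List.foldl_cons, ih, List.flatMap_cons, List.flatMap]

-- ===== VERDICT (by name: the statement is the Claim_ definition above) =====
theorem replace_proofs_with_sorry_in_text_spec : Claim_equal_replace_proofs_with_sorry_in_text := by
  intro text _
  unfold Spec_replace_proofs_with_sorry_in_text replace_proofs_with_sorry_in_text
    replace_proofs_with_sorry_in_text_alt pvLoopA
  rw [(pvLoop_spec (pvSplitKeep [] text.toList)).1 []]
  rw [pvFoldl_flat]
  rw [(pvBlocks_spec (pvSplitKeep [] text.toList)).1 [] (by simp)]
  rfl
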